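-- pv_equiv track=rewrite | github.com/brainpy/BrainPy | brainpy/math/numpy/ast2numba.py | _items2lines
-- ===== SOURCE A (Python) =====
-- def _items2lines(items, num_each_line=1, separator=', ', line_break='\n\t\t'):
--   res = ''
--   for item in items[:num_each_line]:
--     res += item + separator
--   for i in range(num_each_line, len(items), num_each_line):
--     res += line_break
--     for item in items[i: i + num_each_line]:
--       res += item + separator
--   return res
-- ===== SOURCE B (Python) =====
-- def _items2lines(items, num_each_line=1, separator=', ', line_break='\n\t\t'):
--   parts = []
--   for i, item in enumerate(items):
--     if i and i % num_each_line == 0: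
--       parts.append(line_break)
--     parts.append(item)
--     parts.append(separator)
--   return ''.join(parts)
-- ===== Notes on version B (the rewrite author's own statement) =====
-- stated objective: alternative
-- what changed: A materialises chunks with slices (a special-cased first loop over items[:n], then a range(n,len,n) loop concatenating each slice after a break); B never slices or chunks: one flat pass over enumerate(items) appends each item and separator to a token list, inserting line_break exactly when the index is a positive multiple of num_each_line, and joins the tokens once.
-- outside the precondition, e.g. on _items2lines(['a', 'b', 'c'], -1, ', ', '\n'): A returns 'a, b, ', B returns 'a, \nb, \nc, '
import Mathlib
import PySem

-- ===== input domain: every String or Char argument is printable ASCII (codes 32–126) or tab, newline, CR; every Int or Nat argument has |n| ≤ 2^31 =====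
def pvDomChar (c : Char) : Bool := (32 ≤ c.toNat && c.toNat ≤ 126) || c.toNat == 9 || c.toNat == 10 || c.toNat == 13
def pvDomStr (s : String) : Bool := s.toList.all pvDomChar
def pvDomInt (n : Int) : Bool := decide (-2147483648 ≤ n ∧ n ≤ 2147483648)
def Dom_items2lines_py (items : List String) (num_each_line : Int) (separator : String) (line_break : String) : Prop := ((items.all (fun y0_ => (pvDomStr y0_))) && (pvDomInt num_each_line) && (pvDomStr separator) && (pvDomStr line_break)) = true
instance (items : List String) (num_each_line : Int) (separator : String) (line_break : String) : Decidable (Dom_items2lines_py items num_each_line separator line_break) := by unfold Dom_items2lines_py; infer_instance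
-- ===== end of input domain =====

-- B replaces A's slice-based chunk loops by one flat enumerate pass that inserts the break
-- when the index is a positive multiple of num_each_line (objective: alternative algorithm).

-- ===== PORT A =====
def items2lines_py (items : List String) (num_each_line : Int) (separator : String) (line_break : String) : String :=
  -- res = ''; for item in items[:num_each_line]: res += item + separator
  let res : String :=
    (PySem.List.slice items none (some num_each_line)).foldl
      (fun r it => r ++ (it ++ separator)) ""
  -- for i in range(num_each_line, len(items), num_each_line): res += line_break; for item in items[i:i+num_each_line]: res += item + separator
  (PySem.List.pyRange num_each_line (items.length : Int) num_each_line).foldl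
    (fun res i =>
      (PySem.List.slice items (some i) (some (i + num_each_line))).foldl
        (fun r it => r ++ (it ++ separator)) (res ++ line_break)) res

-- ===== PORT B =====
def items2lines_py_alt (items : List String) (num_each_line : Int) (separator : String) (line_break : String) : String :=
  -- parts = []; for i, item in enumerate(items): if i and i % num_each_line == 0: parts.append(line_break); parts.append(item); parts.append(separator)
  let parts : List String :=
    (PySem.List.enumerate items 0).foldl
      (fun ps p =>
        let ps := if p.1 ≠ 0 ∧ PySem.Int.mod p.1 num_each_line = 0 then ps ++ [line_break] else ps
        (ps ++ [p.2]) ++ [separator]) []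
  -- return ''.join(parts)
  PySem.Str.join "" parts

-- ===== PRECONDITION & SPEC =====
-- Pre_ excludes num_each_line = 0, where A raises ValueError (range step 0), and negative
-- num_each_line with a nonempty items list, where A's silently truncated one-line output
-- items[:num_each_line] is an accident of negative slicing, outside the task's natural domain.
def Pre_items2lines_py (items : List String) (num_each_line : Int) (separator : String) (line_break : String) : Prop :=
  1 ≤ num_each_line ∨ (items = [] ∧ num_each_line ≠ 0)
instance (items : List String) (num_each_line : Int) (separator : String) (line_break : String) : Decidable (Pre_items2lines_py items num_each_line separator line_break) := by unfold Pre_items2lines_py; infer_instance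

def pvWitness_items2lines_py : List String × Int × String × String := (["ab", "c", "d"], 2, ", ", "\n")

def Spec_items2lines_py (items : List String) (num_each_line : Int) (separator : String) (line_break : String) (out : String) : Prop := out = items2lines_py_alt items num_each_line separator line_break
instance (items : List String) (num_each_line : Int) (separator : String) (line_break : String) (out : String) : Decidable (Spec_items2lines_py items num_each_line separator line_break out) := by unfold Spec_items2lines_py; infer_instance

-- ===== CLAIM (what is proved, stated in full; the proofs are below) =====
def Claim_equal_items2lines_py : Prop := ∀ (items : List String) (num_each_line : Int) (separator : String) (line_break : String), Dom_items2lines_py items num_each_line separator line_break → Pre_items2lines_py items num_each_line separator line_break → Spec_items2lines_py items num_each_line separator line_break (items2lines_py items num_each_line separator line_break)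

-- ===== LEMMAS AND PROOFS =====

-- basic join-over-"" facts (String-level wrappers over the PySem.Chars lemmas)
theorem join_empty_nil : PySem.Str.join "" ([] : List String) = "" := by
  apply String.ext
  simp [PySem.Str.toList_join, PySem.Chars.join_nil]

theorem join_empty_cons (x : String) (xs : List String) :
    PySem.Str.join "" (x :: xs) = x ++ PySem.Str.join "" xs := by
  apply String.ext
  cases xs with
  | nil => simp [PySem.Str.toList_join, PySem.Chars.join_singleton, PySem.Chars.join_nil]
  | cons y ys => simp [PySem.Str.toList_join, PySem.Chars.join_cons_cons]

theorem join_empty_append (a b : List String) :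
    PySem.Str.join "" (a ++ b) = PySem.Str.join "" a ++ PySem.Str.join "" b := by
  induction a with
  | nil => simp [join_empty_nil]
  | cons x xs ih => simp [join_empty_cons, ih, String.append_assoc]

-- one rendered line: every item followed by the separator
def lineStr (sep : String) (ys : List String) : String :=
  PySem.Str.join "" (ys.map (fun it => it ++ sep))

theorem lineStr_nil (sep : String) : lineStr sep [] = "" := by
  simp [lineStr, join_empty_nil]

theorem lineStr_cons (sep y : String) (ys : List String) :
    lineStr sep (y :: ys) = y ++ sep ++ lineStr sep ys := by
  simp [lineStr, join_empty_cons, String.append_assoc]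

-- the common normal form of both programs: line_break, a full-or-final chunk line, repeat
def tailsOf (m : Nat) (sep lb : String) : List String → String
  | [] => ""
  | y :: rest => lb ++ lineStr sep (y :: rest.take m) ++ tailsOf m sep lb (rest.drop m)
termination_by l => l.length
decreasing_by simp

-- res += item + separator over a chunk, with the accumulator pulled out as a prefix
theorem foldl_extract (sep : String) (ys : List String) : ∀ r : String,
    ys.foldl (fun r it => r ++ (it ++ sep)) r = r ++ lineStr sep ys := by
  induction ys with
  | nil => intro r; simp [lineStr_nil]
  | cons y ys ih =>
      intro r
      simp only [List.foldl_cons, lineStr_cons, ih]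
      simp [String.append_assoc]

-- range(a, b, s) for 0 < s, a < b, peels its head
theorem pyRange_pos_cons (a b s : Int) (hs : 0 < s) (hab : a < b) :
    PySem.List.pyRange a b s = a :: PySem.List.pyRange (a + s) b s := by
  rw [PySem.List.pyRange_of_pos a b hs, PySem.List.pyRange_of_pos (a + s) b hs]
  have hdiv : (b - a + s - 1) / s = (b - a - 1) / s + 1 := by
    have h : b - a + s - 1 = (b - a - 1) + 1 * s := by ring
    rw [h, Int.add_mul_ediv_right _ _ (ne_of_gt hs)]
  have hnn : 0 ≤ (b - a - 1) / s := Int.ediv_nonneg (by omega) hs.le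
  have hcount : (if a < b then ((b - a + s - 1) / s).toNat else 0)
      = (if a + s < b then ((b - (a + s) + s - 1) / s).toNat else 0) + 1 := by
    by_cases h2 : a + s < b
    · have : b - (a + s) + s - 1 = b - a - 1 := by ring
      simp only [if_pos hab, if_pos h2, this, hdiv]
      omega
    · have hz : (b - a - 1) / s = 0 :=
        Int.ediv_eq_zero_of_lt (by omega) (by omega)
      simp only [if_pos hab, if_neg h2, hdiv, hz]
      omega
  rw [hcount, List.range_succ_eq_map, List.map_cons, List.map_map]
  congr 1
  · simp
  · apply List.map_congr_left
    intro j _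
    simp only [Function.comp_apply, Nat.succ_eq_add_one]
    push_cast
    ring

theorem pyRange_pos_nil (a b s : Int) (hs : 0 < s) (hab : b ≤ a) :
    PySem.List.pyRange a b s = [] := by
  rw [PySem.List.pyRange_of_pos a b hs]
  simp [show ¬ (a < b) by omega]

-- the contribution of the remaining chunk indices, as A appends them
def tailsStr (items : List String) (k : Int) (sep lb : String) : List Int → String
  | [] => ""
  | i :: is =>
      lb ++ lineStr sep (PySem.List.slice items (some i) (some (i + k)))
        ++ tailsStr items k sep lb is

theorem main_fold (items : List String) (k : Int) (sep lb : String)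
    (is : List Int) : ∀ (r : String),
      is.foldl (fun res i =>
          (PySem.List.slice items (some i) (some (i + k))).foldl
            (fun r it => r ++ (it ++ sep)) (res ++ lb)) r
        = r ++ tailsStr items k sep lb is := by
  induction is with
  | nil => intro r; simp [tailsStr]
  | cons i is ih =>
      intro r
      rw [List.foldl_cons, foldl_extract, ih]
      simp [tailsStr, String.append_assoc]

-- A's pyRange-of-slices tail equals the chunked normal form
theorem tailsStr_eq (items : List String) (m : Nat) (sep lb : String) :
    ∀ (j k : Nat), items.length ≤ k + j → 0 < k →
      tailsStr items ((m + 1 : Nat) : Int) sep lb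
          (PySem.List.pyRange (k : Int) (items.length : Int) ((m + 1 : Nat) : Int))
        = tailsOf m sep lb (items.drop k) := by
  intro j
  induction j with
  | zero =>
      intro k hlen _
      rw [pyRange_pos_nil _ _ _ (by exact_mod_cast Nat.succ_pos m) (by exact_mod_cast hlen)]
      rw [List.drop_eq_nil_of_le (by omega)]
      simp [tailsStr]
      rw [tailsOf]
  | succ j ih =>
      intro k hlen hk
      by_cases hlt : k < items.length
      · rw [pyRange_pos_cons _ _ _ (by exact_mod_cast Nat.succ_pos m) (by exact_mod_cast hlt)]
        obtain ⟨y, rest, hdrop⟩ : ∃ y rest, items.drop k = y :: rest := by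
          cases h : items.drop k with
          | nil => exact absurd (List.drop_eq_nil_iff.mp h) (by omega)
          | cons y rest => exact ⟨y, rest, rfl⟩
        have hslice : PySem.List.slice items (some (k : Int)) (some ((k : Int) + ((m + 1 : Nat) : Int)))
            = y :: rest.take m := by
          rw [PySem.List.slice_natCast_add items k (m + 1), hdrop, List.take_succ_cons]
        have hcast : (k : Int) + ((m + 1 : Nat) : Int) = ((k + (m + 1) : Nat) : Int) := by push_cast; ring
        have hdrop2 : items.drop (k + (m + 1)) = rest.drop m := by
          rw [← List.drop_drop, hdrop, List.drop_succ_cons]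
        have htail := ih (k + (m + 1)) (by omega) (by omega)
        simp only [tailsStr, hcast, htail, hdrop2, hdrop, tailsOf]
        rw [← hcast, hslice]
      · rw [pyRange_pos_nil _ _ _ (by exact_mod_cast Nat.succ_pos m) (by exact_mod_cast (by omega : items.length ≤ k))]
        rw [List.drop_eq_nil_of_le (by omega)]
        simp [tailsStr]
        rw [tailsOf]

-- A in normal form (n = m+1 ≥ 1): first line, then the chunked tail
theorem A_normal (items : List String) (m : Nat) (sep lb : String) :
    items2lines_py items ((m + 1 : Nat) : Int) sep lb
      = lineStr sep (items.take (m + 1)) ++ tailsOf m sep lb (items.drop (m + 1)) := by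
  unfold items2lines_py
  rw [PySem.List.slice_to_natCast, foldl_extract, main_fold,
      tailsStr_eq items m sep lb items.length (m + 1) (by omega) (by omega)]
  simp

-- ---- B side ----

-- B's flat pass written as structural recursion with an explicit running index
def flatS (n : Int) (sep lb : String) : List String → Int → String
  | [], _ => ""
  | x :: xs, i =>
      (if i ≠ 0 ∧ PySem.Int.mod i n = 0 then lb else "") ++ x ++ sep ++ flatS n sep lb xs (i + 1)

-- the foldl over enumerate, joined, is the flat recursion
theorem B_fold (n : Int) (sep lb : String) (l : List String) : ∀ (i : Int) (acc : List String),
    PySem.Str.join ""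
        ((PySem.List.enumerate l i).foldl
          (fun ps p =>
            let ps := if p.1 ≠ 0 ∧ PySem.Int.mod p.1 n = 0 then ps ++ [lb] else ps
            (ps ++ [p.2]) ++ [sep]) acc)
      = PySem.Str.join "" acc ++ flatS n sep lb l i := by
  induction l with
  | nil => intro i acc; simp [PySem.List.enumerate_nil, flatS]
  | cons x xs ih =>
      intro i acc
      rw [PySem.List.enumerate_cons, List.foldl_cons]
      simp only
      rw [ih]
      by_cases h : i ≠ 0 ∧ PySem.Int.mod i n = 0
      · simp only [flatS, if_pos h]
        simp [join_empty_append, join_empty_cons, join_empty_nil, String.append_assoc]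
      · simp only [flatS, if_neg h]
        simp [join_empty_append, join_empty_cons, join_empty_nil, String.append_assoc]

-- how many items are left in the current line when the flat pass stands at index i
def remC (m i : Nat) : Nat := if i ≠ 0 ∧ i % (m + 1) = 0 then 0 else (m + 1) - i % (m + 1)

theorem succ_mod_succ (m i : Nat) :
    (i + 1) % (m + 1) = if i % (m + 1) = m then 0 else i % (m + 1) + 1 := by
  rcases Nat.eq_zero_or_pos m with hm | hm
  · subst hm; simp [Nat.mod_one]
  · have h1 : 1 % (m + 1) = 1 := Nat.mod_eq_of_lt (by omega)
    rw [Nat.add_mod, h1]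
    have hr : i % (m + 1) < m + 1 := Nat.mod_lt _ (by omega)
    by_cases h : i % (m + 1) = m
    · simp [h]
    · rw [if_neg h, Nat.mod_eq_of_lt (by omega)]

-- the flat pass at index i equals: the rest of the current line, then the chunked tail
theorem flat_eq (m : Nat) (sep lb : String) (l : List String) : ∀ (i : Nat),
    flatS ((m + 1 : Nat) : Int) sep lb l (i : Int)
      = lineStr sep (l.take (remC m i)) ++ tailsOf m sep lb (l.drop (remC m i)) := by
  induction l with
  | nil => intro i; simp [flatS, lineStr_nil, tailsOf]
  | cons x xs ih =>
      intro i
      have hmod : PySem.Int.mod (i : Int) ((m + 1 : Nat) : Int) = ((i % (m + 1) : Nat) : Int) :=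
        PySem.Int.mod_natCast i (m + 1)
      have hcast : (i : Int) + 1 = ((i + 1 : Nat) : Int) := by push_cast; ring
      have hcond : ((i : Int) ≠ 0 ∧ PySem.Int.mod (i : Int) ((m + 1 : Nat) : Int) = 0)
          ↔ (i ≠ 0 ∧ i % (m + 1) = 0) := by
        rw [hmod]
        constructor
        · rintro ⟨h1, h2⟩; exact ⟨by exact_mod_cast h1, by exact_mod_cast h2⟩
        · rintro ⟨h1, h2⟩; exact ⟨by exact_mod_cast h1, by exact_mod_cast h2⟩
      have hsucc := succ_mod_succ m i
      have hrlt : i % (m + 1) < m + 1 := Nat.mod_lt _ (by omega)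
      by_cases h : i ≠ 0 ∧ i % (m + 1) = 0
      · -- break is emitted here: the tail chunk starts at x
        have hrem : remC m i = 0 := by simp [remC, h.1, h.2]
        rw [show flatS ((m + 1 : Nat) : Int) sep lb (x :: xs) (i : Int)
              = lb ++ x ++ sep ++ flatS ((m + 1 : Nat) : Int) sep lb xs ((i : Int) + 1) by
            simp only [flatS]
            rw [if_pos (hcond.mpr h)]]
        rw [hcast, ih (i + 1), hrem]
        have hrem' : remC m (i + 1) = m := by
          rcases Nat.eq_zero_or_pos m with hm | hm
          · subst hm
            have h0 : (i + 1) % 1 = 0 := Nat.mod_one _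
            simp only [remC]
            rw [if_pos ⟨by omega, h0⟩]
          · have h1 : (i + 1) % (m + 1) = 1 := by rw [hsucc, if_neg (by omega), h.2]
            have hne : ¬ ((i + 1 ≠ 0) ∧ (i + 1) % (m + 1) = 0) := by rw [h1]; omega
            simp only [remC]
            rw [if_neg hne, h1]
            omega
        rw [hrem']
        simp [tailsOf, lineStr_cons, lineStr_nil, String.append_assoc]
      · -- inside the current line: consume one item of it
        have hrem : remC m i = (m + 1) - i % (m + 1) := by simp [remC, h]
        have hrpos : 0 < remC m i := by rw [hrem]; omega
        have hrem' : remC m (i + 1) = remC m i - 1 := by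
          by_cases he : i % (m + 1) = m
          · have h0 : (i + 1) % (m + 1) = 0 := by rw [hsucc, if_pos he]
            have hz : remC m (i + 1) = 0 := by
              simp only [remC]
              rw [if_pos ⟨by omega, h0⟩]
            rw [hz, hrem, he]
            omega
          · have h1 : (i + 1) % (m + 1) = i % (m + 1) + 1 := by rw [hsucc, if_neg he]
            have hne : ¬ ((i + 1 ≠ 0) ∧ (i + 1) % (m + 1) = 0) := by
              rw [h1]; omega
            have hv : remC m (i + 1) = m + 1 - (i % (m + 1) + 1) := by
              simp only [remC]
              rw [if_neg hne, h1]
            rw [hv, hrem]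
            omega
        rw [show flatS ((m + 1 : Nat) : Int) sep lb (x :: xs) (i : Int)
              = "" ++ x ++ sep ++ flatS ((m + 1 : Nat) : Int) sep lb xs ((i : Int) + 1) by
            simp only [flatS]
            rw [if_neg (fun hc => h (hcond.mp hc))]]
        rw [hcast, ih (i + 1), hrem']
        obtain ⟨c, hc⟩ : ∃ c, remC m i = c + 1 := ⟨remC m i - 1, by omega⟩
        rw [hc, List.take_succ_cons, List.drop_succ_cons, lineStr_cons]
        simp [String.append_assoc]

-- B in the same normal form (n = m+1 ≥ 1)
theorem B_normal (items : List String) (m : Nat) (sep lb : String) :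
    items2lines_py_alt items ((m + 1 : Nat) : Int) sep lb
      = lineStr sep (items.take (m + 1)) ++ tailsOf m sep lb (items.drop (m + 1)) := by
  unfold items2lines_py_alt
  rw [B_fold ((m + 1 : Nat) : Int) sep lb items 0 [], join_empty_nil]
  have hf := flat_eq m sep lb items 0
  simp only [Nat.cast_zero] at hf
  rw [hf]
  have h0 : remC m 0 = m + 1 := by simp [remC]
  rw [h0]
  simp

-- ===== VERDICT (by name: the statement is the Claim_ definition above) =====
theorem items2lines_py_spec : Claim_equal_items2lines_py := by
  intro items n sep lb _ hpre
  unfold Spec_items2lines_py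
  rcases hpre with hn | ⟨hnil, hne⟩
  · -- 1 ≤ n : write n = m + 1 and compare the two normal forms
    obtain ⟨m, hm⟩ : ∃ m : Nat, n = ((m + 1 : Nat) : Int) :=
      ⟨(n - 1).toNat, by omega⟩
    subst hm
    rw [A_normal, B_normal]
  · -- items = [], n ≠ 0: both sides are the empty string
    subst hnil
    unfold items2lines_py items2lines_py_alt
    have hr : PySem.List.pyRange n ((List.length ([] : List String) : Int)) n = [] := by
      rcases lt_or_gt_of_ne hne with hneg | hpos
      · simp only [List.length_nil, Int.natCast_zero]
        unfold PySem.List.pyRange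
        rw [if_neg hne]
        simp [show ¬ ((0:Int) < n) by omega]
      · exact pyRange_pos_nil _ _ _ hpos (by simp; omega)
    rw [hr]
    simp [PySem.List.slice, PySem.List.enumerate_nil, join_empty_nil]
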